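-- pv_equiv track=rewrite | github.com/Khamel83/atlas | ask/temporal/temporal_engine.py | _suggest_focus_blocks
-- ===== SOURCE A (Python) =====
-- from typing import Dict, List, Optional, Any, Tuple
--
-- def _suggest_focus_blocks(productive_hours: List[int]) -> List[Tuple[int, int]]:
--     """Suggest optimal focus blocks based on productive hours."""
--     if not productive_hours:
--         return [(9, 11), (14, 16)]  # Default focus blocks
--
--     # Group consecutive hours into blocks
--     productive_hours = sorted(list(set(productive_hours)))
--     blocks = []
--     start = productive_hours[0]
--     end = start
--
--     for hour in productive_hours[1:]:
--         if hour == end + 1: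
--             end = hour
--         else:
--             blocks.append((start, end))
--             start = hour
--             end = hour
--     blocks.append((start, end))
--
--     # Limit to 2-3 best blocks
--     return blocks[:3]
-- ===== SOURCE B (Python) =====
-- from typing import List, Tuple
--
-- def _suggest_focus_blocks(productive_hours: List[int]) -> List[Tuple[int, int]]:
--     if not productive_hours:
--         return [(9, 11), (14, 16)]
--     s = set(productive_hours)
--     starts = sorted(h for h in s if h - 1 not in s)
--     ends = sorted(h for h in s if h + 1 not in s)
--     return list(zip(starts, ends))[:3]
-- ===== Notes on version B (the rewrite author's own statement) =====
-- stated objective: alternative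
-- what changed: Replaces the sorted-scan run-coalescing state machine with a set-membership characterization: block starts are hours h with h-1 not in the set, ends are hours with h+1 not in the set, independently sorted and zipped.
import Mathlib
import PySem

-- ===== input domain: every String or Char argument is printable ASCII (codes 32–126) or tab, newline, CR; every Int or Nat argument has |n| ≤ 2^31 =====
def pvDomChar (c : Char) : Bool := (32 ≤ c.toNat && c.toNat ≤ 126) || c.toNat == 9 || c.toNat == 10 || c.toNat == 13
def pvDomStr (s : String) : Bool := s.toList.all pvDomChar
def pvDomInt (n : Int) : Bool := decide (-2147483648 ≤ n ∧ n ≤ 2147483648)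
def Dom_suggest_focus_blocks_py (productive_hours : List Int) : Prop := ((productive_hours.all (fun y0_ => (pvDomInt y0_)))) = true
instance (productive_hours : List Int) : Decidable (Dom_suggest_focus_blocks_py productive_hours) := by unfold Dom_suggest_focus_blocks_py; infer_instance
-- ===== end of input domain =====

-- B replaces A's run-coalescing scan over the sorted list with a set-membership
-- characterization: starts are hours h with h-1 not in the set, ends are hours with
-- h+1 not in the set, sorted independently and zipped (alternative algorithm, same cost).

-- ===== PORT A =====
-- A's accumulation loop: blocks so far, current run's start and end.
def pvLoopA (l : List Int) (blocks : List (Int × Int)) (start e : Int) : List (Int × Int) :=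
  match l with
  | [] => blocks ++ [(start, e)]
  | h :: t =>
    if h = e + 1 then pvLoopA t blocks start h
    else pvLoopA t (blocks ++ [(start, e)]) h h

def suggest_focus_blocks_py (productive_hours : List Int) : List (Int × Int) :=
  if productive_hours = [] then [(9, 11), (14, 16)]
  else
    match PySem.List.sorted (PySem.Set.ofList productive_hours) (fun x => x) false with
    | [] => []  -- unreachable: the sorted set of a nonempty list is nonempty
    | h :: t => (pvLoopA t [] h h).take 3

-- ===== PORT B =====
-- set(productive_hours); starts/ends as sorted membership filters; zip, slice [:3].
def suggest_focus_blocks_py_alt (productive_hours : List Int) : List (Int × Int) :=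
  if productive_hours = [] then [(9, 11), (14, 16)]
  else
    let s : PySem.Set Int := PySem.Set.ofList productive_hours
    let starts := PySem.List.sorted (s.filter (fun h => decide ((h - 1) ∉ s))) (fun x => x) false
    let ends := PySem.List.sorted (s.filter (fun h => decide ((h + 1) ∉ s))) (fun x => x) false
    (starts.zip ends).take 3

-- ===== PRECONDITION & SPEC =====
def Spec_suggest_focus_blocks_py (productive_hours : List Int) (out : List (Int × Int)) : Prop := out = suggest_focus_blocks_py_alt productive_hours
instance (productive_hours : List Int) (out : List (Int × Int)) : Decidable (Spec_suggest_focus_blocks_py productive_hours out) := by unfold Spec_suggest_focus_blocks_py; infer_instance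

-- ===== CLAIM (what is proved, stated in full; the proofs are below) =====
def Claim_equal_suggest_focus_blocks_py : Prop := ∀ (productive_hours : List Int), Dom_suggest_focus_blocks_py productive_hours → Spec_suggest_focus_blocks_py productive_hours (suggest_focus_blocks_py productive_hours)

-- ===== LEMMAS AND PROOFS =====

-- A's loop on a strictly increasing tail equals the zip of start/end membership filters
-- phrased locally on the remaining tail and current end value.
lemma pvLoopA_zip (t : List Int) : ∀ (blocks : List (Int × Int)) (start e : Int),
    t.Pairwise (· < ·) → (∀ x ∈ t, e < x) →
    pvLoopA t blocks start e =
      blocks ++ List.zip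
        (start :: t.filter (fun x => decide (x - 1 ≠ e ∧ x - 1 ∉ t)))
        ((e :: t).filter (fun x => decide (x + 1 ∉ t))) := by
  induction t with
  | nil => intro blocks start e _ _; simp [pvLoopA]
  | cons h t ih =>
    intro blocks start e hpw hgt
    have hh : e < h := hgt h (by simp)
    have hpw' : t.Pairwise (· < ·) := hpw.of_cons
    have hht : ∀ x ∈ t, h < x := fun x hx => List.rel_of_pairwise_cons hpw hx
    by_cases hc : h = e + 1
    · have hstarts : (h :: t).filter (fun x => decide (x - 1 ≠ e ∧ x - 1 ∉ h :: t))
          = t.filter (fun x => decide (x - 1 ≠ h ∧ x - 1 ∉ t)) := by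
        have hdrop : (decide (h - 1 ≠ e ∧ h - 1 ∉ h :: t)) = false := by
          simp only [decide_eq_false_iff_not, not_and]
          intro h1; exact absurd (by omega : h - 1 = e) h1
        rw [List.filter_cons, hdrop, if_neg (by simp)]
        apply List.filter_congr
        intro x hx
        have hx1 : h < x := hht x hx
        simp only [decide_eq_decide, List.mem_cons, not_or]
        constructor
        · rintro ⟨_, a, b⟩; exact ⟨a, b⟩
        · rintro ⟨a, b⟩; exact ⟨by omega, a, b⟩
      have hends : (e :: h :: t).filter (fun x => decide (x + 1 ∉ h :: t))
          = (h :: t).filter (fun x => decide (x + 1 ∉ t)) := by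
        have hdrop : (decide (e + 1 ∉ h :: t)) = false := by
          simp only [decide_eq_false_iff_not, not_not, List.mem_cons]
          exact Or.inl (by omega)
        rw [List.filter_cons, hdrop, if_neg (by simp)]
        apply List.filter_congr
        intro x hx
        have hx1 : h ≤ x := by
          rcases List.mem_cons.mp hx with hxh | hxt
          · omega
          · exact le_of_lt (hht x hxt)
        simp only [decide_eq_decide, List.mem_cons, not_or]
        constructor
        · rintro ⟨_, b⟩; exact b
        · intro b; exact ⟨by omega, b⟩
      rw [pvLoopA, if_pos hc, ih blocks start h hpw' hht, hstarts, hends]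
    · have hstarts : (h :: t).filter (fun x => decide (x - 1 ≠ e ∧ x - 1 ∉ h :: t))
          = h :: t.filter (fun x => decide (x - 1 ≠ h ∧ x - 1 ∉ t)) := by
        have hkeep : (decide (h - 1 ≠ e ∧ h - 1 ∉ h :: t)) = true := by
          simp only [decide_eq_true_eq, List.mem_cons, not_or]
          refine ⟨by omega, by omega, ?_⟩
          intro h2; exact absurd (hht _ h2) (by omega)
        rw [List.filter_cons, hkeep, if_pos rfl]
        congr 1
        apply List.filter_congr
        intro x hx
        have hx1 : h < x := hht x hx
        simp only [decide_eq_decide, List.mem_cons, not_or]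
        constructor
        · rintro ⟨_, a, b⟩; exact ⟨a, b⟩
        · rintro ⟨a, b⟩; exact ⟨by omega, a, b⟩
      have hends : (e :: h :: t).filter (fun x => decide (x + 1 ∉ h :: t))
          = e :: (h :: t).filter (fun x => decide (x + 1 ∉ t)) := by
        have hkeep : (decide (e + 1 ∉ h :: t)) = true := by
          simp only [decide_eq_true_eq, List.mem_cons, not_or]
          refine ⟨by omega, ?_⟩
          intro h2; exact absurd (hht _ h2) (by omega)
        rw [List.filter_cons, hkeep, if_pos rfl]
        congr 1
        apply List.filter_congr
        intro x hx
        have hx1 : h ≤ x := by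
          rcases List.mem_cons.mp hx with hxh | hxt
          · omega
          · exact le_of_lt (hht x hxt)
        simp only [decide_eq_decide, List.mem_cons, not_or]
        constructor
        · rintro ⟨_, b⟩; exact b
        · intro b; exact ⟨by omega, b⟩
      rw [pvLoopA, if_neg hc, ih (blocks ++ [(start, e)]) h h hpw' hht, hstarts, hends,
        List.zip_cons_cons]
      simp

lemma sorted_set_ne_nil {xs : List Int} (h : xs ≠ []) :
    PySem.List.sorted (PySem.Set.ofList xs) (fun x => x) false ≠ [] := by
  intro hc
  rw [PySem.List.sorted_eq_nil_iff] at hc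
  obtain ⟨x, hx⟩ := List.exists_mem_of_ne_nil xs h
  have : x ∈ PySem.Set.ofList xs := (PySem.Set.mem_ofList xs x).mpr hx
  simp [hc] at this

-- sorting the filtered set is filtering the sorted set (identity key, strict order).
lemma sorted_filter_set (xs : List Int) (p : Int → Bool) :
    PySem.List.sorted ((PySem.Set.ofList xs).filter p) (fun x => x) false
      = (PySem.List.sorted (PySem.Set.ofList xs) (fun x => x) false).filter p := by
  apply PySem.List.sorted_eq_of_perm_of_pairwise_lt
  · exact ((PySem.List.sorted_perm _ _ _).filter p)
  · exact List.Pairwise.sublist List.filter_sublist (PySem.List.sorted_ofList_pairwise_lt xs)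

-- ===== VERDICT (by name: the statement is the Claim_ definition above) =====
theorem suggest_focus_blocks_py_spec : Claim_equal_suggest_focus_blocks_py := by
  intro xs _
  unfold Spec_suggest_focus_blocks_py suggest_focus_blocks_py suggest_focus_blocks_py_alt
  by_cases hxs : xs = []
  · simp [hxs]
  · simp only [if_neg hxs]
    have hmem : ∀ y, y ∈ PySem.Set.ofList xs
        ↔ y ∈ PySem.List.sorted (PySem.Set.ofList xs) (fun x => x) false := by
      intro y
      rw [PySem.List.mem_sorted]
    rw [sorted_filter_set, sorted_filter_set]
    have hpw := PySem.List.sorted_ofList_pairwise_lt xs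
    cases hs : PySem.List.sorted (PySem.Set.ofList xs) (fun x => x) false with
    | nil => exact absurd hs (sorted_set_ne_nil hxs)
    | cons hd tl =>
      rw [hs] at hpw hmem
      have hpw' : tl.Pairwise (· < ·) := hpw.of_cons
      have hgt : ∀ x ∈ tl, hd < x := fun x hx => List.rel_of_pairwise_cons hpw hx
      show (pvLoopA tl [] hd hd).take 3 = _
      have hstarts : (hd :: tl).filter (fun h => decide (h - 1 ∉ PySem.Set.ofList xs))
          = hd :: tl.filter (fun x => decide (x - 1 ≠ hd ∧ x - 1 ∉ tl)) := by
        have hkeep : (decide (hd - 1 ∉ PySem.Set.ofList xs)) = true := by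
          simp only [decide_eq_true_eq, hmem, List.mem_cons, not_or]
          refine ⟨by omega, ?_⟩
          intro h2; exact absurd (hgt _ h2) (by omega)
        rw [List.filter_cons, hkeep, if_pos rfl]
        congr 1
        apply List.filter_congr
        intro x hx
        simp only [hmem, List.mem_cons, not_or]
      have hends : (hd :: tl).filter (fun h => decide (h + 1 ∉ PySem.Set.ofList xs))
          = (hd :: tl).filter (fun x => decide (x + 1 ∉ tl)) := by
        apply List.filter_congr
        intro x hx
        have hx1 : hd ≤ x := by
          rcases List.mem_cons.mp hx with hxh | hxt
          · omega
          · exact le_of_lt (hgt x hxt)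
        simp only [decide_eq_decide, hmem, List.mem_cons, not_or]
        constructor
        · rintro ⟨_, b⟩; exact b
        · intro b; exact ⟨by omega, b⟩
      rw [pvLoopA_zip tl [] hd hd hpw' hgt, List.nil_append, hstarts, hends]
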